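-- pv_equiv track=rewrite | github.com/edencheung/MARVEL | results/latex_bullets.py | format_latex_list
-- ===== SOURCE A (Python) =====
-- import collections
--
-- def format_latex_list(data):
--     """
--     Groups items by their categories and formats them into a LaTeX bullet point list.
--
--     Args:
--         data: A dictionary where keys are items and values are their categories.
--
--     Returns:
--         A string containing the LaTeX formatted bullet point list.
--     """
--     grouped_items = collections.defaultdict(list)
--     for item, category in data.items():
--         grouped_items[category].append(item)
--
--     latex_string = "\\begin{itemize}\n"
--     for category, items in grouped_items.items():
--         formatted_items = [f"\\texttt{{{item}}}" for item in items]
--         items_list_latex = ", ".join(formatted_items)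
--         latex_string += f"  \\item \\textbf{{{category}}}: {items_list_latex}\n"
--     latex_string += "\\end{itemize}"
--
--     return latex_string
-- ===== SOURCE B (Python) =====
-- def format_latex_list(data):
--     """
--     Groups items by their categories and formats them into a LaTeX bullet point list.
--
--     Args:
--         data: A dictionary where keys are items and values are their categories.
--
--     Returns:
--         A string containing the LaTeX formatted bullet point list.
--     """
--     categories = list(dict.fromkeys(data.values()))
--     lines = [
--         "  \\item \\textbf{" + category + "}: "
--         + ", ".join("\\texttt{" + item + "}" for item, cat in data.items() if cat == category)
--         + "\n"
--         for category in categories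
--     ]
--     return "\\begin{itemize}\n" + "".join(lines) + "\\end{itemize}"
-- ===== Notes on version B (the rewrite author's own statement) =====
-- stated objective: alternative
-- what changed: A builds a defaultdict of category->items in one grouping pass and then walks its items; B first computes the distinct categories in first-appearance order with dict.fromkeys(data.values()) and then, per category, collects its items by filtering the whole dict with a comprehension, assembling the lines by a join instead of string accumulation.
import Mathlib
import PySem

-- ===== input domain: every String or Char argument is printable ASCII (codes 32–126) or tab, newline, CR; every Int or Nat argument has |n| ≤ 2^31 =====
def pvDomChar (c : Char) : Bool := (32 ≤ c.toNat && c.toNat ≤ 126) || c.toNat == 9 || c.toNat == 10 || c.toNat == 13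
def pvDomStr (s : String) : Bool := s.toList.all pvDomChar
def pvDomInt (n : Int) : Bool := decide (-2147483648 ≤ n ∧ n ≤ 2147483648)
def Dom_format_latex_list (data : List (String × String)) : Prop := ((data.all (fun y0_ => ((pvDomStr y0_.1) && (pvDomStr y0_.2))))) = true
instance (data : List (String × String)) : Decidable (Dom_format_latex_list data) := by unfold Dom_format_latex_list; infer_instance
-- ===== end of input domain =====

-- B replaces A's defaultdict grouping pass by a categories table (dict.fromkeys of the values)
-- followed by one filtering scan of the whole dict per category (objective: alternative decomposition).

-- ===== PORT A =====
def format_latex_list (data : List (String × String)) : String :=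
  let grouped := data.foldl (fun d p => d.modify p.2 [] (fun l => l ++ [p.1])) PySem.Dict.empty
  let body := grouped.items.foldl
    (fun s ci =>
      s ++ ("  \\item \\textbf{" ++ ci.1 ++ "}: " ++
        PySem.Str.join ", " (ci.2.map (fun it => "\\texttt{" ++ it ++ "}")) ++ "\n"))
    "\\begin{itemize}\n"
  body ++ "\\end{itemize}"

-- ===== PORT B =====
def format_latex_list_alt (data : List (String × String)) : String :=
  let categories := PySem.List.dedup (data.map Prod.snd)
  let lines := categories.map (fun c =>
    "  \\item \\textbf{" ++ c ++ "}: " ++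
      PySem.Str.join ", " (((data.filter (fun p => p.2 == c)).map Prod.fst).map
        (fun it => "\\texttt{" ++ it ++ "}")) ++ "\n")
  "\\begin{itemize}\n" ++ PySem.Str.join "" lines ++ "\\end{itemize}"

-- ===== PRECONDITION & SPEC =====
def Spec_format_latex_list (data : List (String × String)) (out : String) : Prop := out = format_latex_list_alt data
instance (data : List (String × String)) (out : String) : Decidable (Spec_format_latex_list data out) := by unfold Spec_format_latex_list; infer_instance

-- ===== CLAIM (what is proved, stated in full; the proofs are below) =====
def Claim_equal_format_latex_list : Prop := ∀ (data : List (String × String)), Dom_format_latex_list data → Spec_format_latex_list data (format_latex_list data)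

-- ===== LEMMAS AND PROOFS =====

-- "".join with empty separator peels off the head piece
theorem join_empty_cons (x : List Char) (xs : List (List Char)) :
    PySem.Chars.join [] (x :: xs) = x ++ PySem.Chars.join [] xs := by
  cases xs with
  | nil => simp [PySem.Chars.join_singleton, PySem.Chars.join_nil]
  | cons b r => rw [PySem.Chars.join_cons_cons]; simp

-- A's string-accumulating fold computes "".join of the mapped lines
theorem foldl_append_eq_join {α : Type} (g : α → String) (l : List α) (s0 : String) :
    l.foldl (fun s x => s ++ g x) s0 = s0 ++ PySem.Str.join "" (l.map g) := by
  induction l generalizing s0 with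
  | nil => simp [PySem.Str.join]
  | cons a t ih =>
    rw [List.foldl_cons, ih, ← String.toList_inj]
    simp [PySem.Str.toList_join, join_empty_cons]

-- looking up a category in A's grouped dict yields B's filtered item list
theorem grouped_getD_eq (data : List (String × String)) (c : String) :
    (data.foldl (fun d p => d.modify p.2 [] (fun l => l ++ [p.1])) PySem.Dict.empty).getD c []
      = (data.filter (fun p => p.2 == c)).map Prod.fst := by
  have h : data.foldl (fun d p => d.modify p.2 [] (fun l => l ++ [p.1])) PySem.Dict.empty
      = (data.map (fun p => (p.2, p.1))).foldl (fun d q => d.modify q.1 [] (fun l => l ++ [q.2])) PySem.Dict.empty := by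
    rw [List.foldl_map]
  rw [h, PySem.Dict.getD_foldl_modify_append]
  simp [List.filter_map, Function.comp_def]

-- A's grouped dict, read as items, is B's table of categories with their filtered items
theorem grouped_items_eq (data : List (String × String)) :
    (data.foldl (fun d p => d.modify p.2 [] (fun l => l ++ [p.1])) PySem.Dict.empty).items
      = (PySem.List.dedup (data.map Prod.snd)).map
          (fun c => (c, (data.filter (fun p => p.2 == c)).map Prod.fst)) := by
  have hnd : (data.foldl (fun d p => d.modify p.2 [] (fun l => l ++ [p.1])) PySem.Dict.empty).keys.Nodup := by
    exact PySem.Dict.nodup_keys_foldl_modify_key data Prod.snd [] (fun _ p => (fun l => l ++ [p.1])) PySem.Dict.empty (by simp)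
  have hkeys : (data.foldl (fun d p => d.modify p.2 [] (fun l => l ++ [p.1])) PySem.Dict.empty).keys
      = PySem.List.dedup (data.map Prod.snd) := by
    rw [PySem.Dict.keys_foldl_modify_key]
    simp [PySem.Set.update_nil_left]
  rw [PySem.Dict.items_eq_map_keys _ hnd [], hkeys]
  simp only [grouped_getD_eq]

-- ===== VERDICT (by name: the statement is the Claim_ definition above) =====
theorem format_latex_list_spec : Claim_equal_format_latex_list := by
  intro data _
  unfold Spec_format_latex_list format_latex_list format_latex_list_alt
  dsimp only
  rw [grouped_items_eq, foldl_append_eq_join, List.map_map]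
  rfl
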